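-- pv_equiv track=rewrite | github.com/this-ZZHXD/OptimizationofQuantumCircuit | env/env_zx.py | calculate_gate_metrics_from_sequence
-- ===== SOURCE A (Python) =====
-- def calculate_gate_metrics_from_sequence(physical_gate_sequence: str):
--     """
--     Calculate the number of CNOT gates, T gates, and S gates in the physical gate sequence.
--
--     :param physical_gate_sequence: Physical gate sequence string, where each gate is formatted as 'GATE QUBITS PARAM'.
--     :return: (cnot_count, t_count, s_count) - the counts of the respective metrics
--     """
--     # Initialize counters
--     cnot_count = 0
--     t_count = 0
--     s_count = 0
--
--     # Iterate over each line in the physical gate sequence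
--     lines = physical_gate_sequence.splitlines()
--     for line in lines:
--         # Extract the gate type
--         parts = line.split()
--         gate_type = parts[0]
--
--         # Count the occurrences of specific gates
--         if gate_type == "CZ":  # CNOT gate (corresponding to CZ gate in QCIS instruction set)
--             cnot_count += 1
--         elif gate_type in {"T", "TD"}:  # T gate or T† gate
--             t_count += 1
--         elif gate_type in {"S", "SD", "H"}:  # S gate, S† gate, and Hadamard gate
--             s_count += 1
--
--     return cnot_count, t_count, s_count
-- ===== SOURCE B (Python) =====
-- def calculate_gate_metrics_from_sequence(physical_gate_sequence: str):
--     # Staged passes: first materialize the list of leading tokens, then count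
--     # each target gate name with separate list.count scans over that list.
--     tokens = [line.split()[0] for line in physical_gate_sequence.splitlines()]
--     return (tokens.count("CZ"),
--             tokens.count("T") + tokens.count("TD"),
--             tokens.count("S") + tokens.count("SD") + tokens.count("H"))
-- ===== Notes on version B (the rewrite author's own statement) =====
-- stated objective: simpler
-- what changed: B replaces A's single pass with a per-line if/elif chain over three running counters by two stages: materialize the list of first tokens, then obtain each metric by independent list.count scans, with no branching or accumulator.
-- outside the precondition, e.g. on calculate_gate_metrics_from_sequence('CZ 1\nT 2\n\nS 3'): A raises IndexError, B raises IndexError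
import Mathlib
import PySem

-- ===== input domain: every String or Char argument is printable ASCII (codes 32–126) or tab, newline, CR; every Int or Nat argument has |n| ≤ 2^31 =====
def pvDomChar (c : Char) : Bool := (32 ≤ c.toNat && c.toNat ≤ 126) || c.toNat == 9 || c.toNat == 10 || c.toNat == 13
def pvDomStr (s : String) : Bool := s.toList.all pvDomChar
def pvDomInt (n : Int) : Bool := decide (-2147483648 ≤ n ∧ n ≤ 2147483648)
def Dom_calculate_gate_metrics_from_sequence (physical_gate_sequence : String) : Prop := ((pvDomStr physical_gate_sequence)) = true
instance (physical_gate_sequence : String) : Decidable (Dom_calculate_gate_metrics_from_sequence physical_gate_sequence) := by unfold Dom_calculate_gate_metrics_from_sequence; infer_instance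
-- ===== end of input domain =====

-- B replaces A's per-line if/elif counter loop by two stages: build the list of first
-- tokens, then count each gate name with separate list.count scans (simpler decomposition).


-- ===== PORT A =====
-- per-line step: parts = line.split(); gate_type = parts[0] (IndexError when empty ⇒ Pre_);
-- then the if/elif chain updating the three counters
def pvAstep (acc : Int × Int × Int) (line : String) : Int × Int × Int :=
  let parts := PySem.Str.split₀ line
  let gate_type := PySem.List.pyGetD parts 0 ""
  if gate_type = "CZ" then (acc.1 + 1, acc.2.1, acc.2.2)
  else if gate_type = "T" ∨ gate_type = "TD" then (acc.1, acc.2.1 + 1, acc.2.2)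
  else if gate_type = "S" ∨ gate_type = "SD" ∨ gate_type = "H" then (acc.1, acc.2.1, acc.2.2 + 1)
  else acc

def calculate_gate_metrics_from_sequence (physical_gate_sequence : String) : Int × Int × Int :=
  (PySem.Str.splitlines physical_gate_sequence).foldl pvAstep (0, 0, 0)

-- ===== PORT B =====
-- first whitespace token of a line: line.split()[0] (IndexError when empty ⇒ Pre_)
def pvTok (line : String) : String := PySem.List.pyGetD (PySem.Str.split₀ line) 0 ""

def calculate_gate_metrics_from_sequence_alt (physical_gate_sequence : String) : Int × Int × Int :=
  let tokens := (PySem.Str.splitlines physical_gate_sequence).map pvTok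
  ((PySem.List.count tokens "CZ" : Int),
   (PySem.List.count tokens "T" : Int) + (PySem.List.count tokens "TD" : Int),
   (PySem.List.count tokens "S" : Int) + (PySem.List.count tokens "SD" : Int) + (PySem.List.count tokens "H" : Int))

-- ===== PRECONDITION & SPEC =====
-- Pre_ excludes inputs containing a blank / whitespace-only line: there line.split()[0]
-- raises IndexError in both A and B.
def Pre_calculate_gate_metrics_from_sequence (physical_gate_sequence : String) : Prop :=
  ∀ line ∈ PySem.Str.splitlines physical_gate_sequence, PySem.Str.split₀ line ≠ []
instance (physical_gate_sequence : String) : Decidable (Pre_calculate_gate_metrics_from_sequence physical_gate_sequence) := by unfold Pre_calculate_gate_metrics_from_sequence; infer_instance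

def pvWitness_calculate_gate_metrics_from_sequence : String := "CZ 1 2\nT 3\nH 0"

def Spec_calculate_gate_metrics_from_sequence (physical_gate_sequence : String) (out : Int × Int × Int) : Prop := out = calculate_gate_metrics_from_sequence_alt physical_gate_sequence
instance (physical_gate_sequence : String) (out : Int × Int × Int) : Decidable (Spec_calculate_gate_metrics_from_sequence physical_gate_sequence out) := by unfold Spec_calculate_gate_metrics_from_sequence; infer_instance

-- ===== CLAIM =====
def Claim_equal_calculate_gate_metrics_from_sequence : Prop := ∀ (physical_gate_sequence : String), Dom_calculate_gate_metrics_from_sequence physical_gate_sequence → Pre_calculate_gate_metrics_from_sequence physical_gate_sequence → Spec_calculate_gate_metrics_from_sequence physical_gate_sequence (calculate_gate_metrics_from_sequence physical_gate_sequence)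

-- ===== LEMMAS AND PROOFS =====

-- A's fold adds, to any starting accumulator, the counts of the relevant first tokens
theorem pvA_foldl_count (L : List String) (c t s : Int) :
    L.foldl pvAstep (c, t, s) =
      (c + ((L.map pvTok).count "CZ" : Int),
       t + ((L.map pvTok).count "T" + (L.map pvTok).count "TD" : Int),
       s + ((L.map pvTok).count "S" + (L.map pvTok).count "SD" + (L.map pvTok).count "H" : Int)) := by
  induction L generalizing c t s with
  | nil => simp
  | cons l L ih =>
    simp only [List.foldl_cons, List.map_cons, pvAstep, pvTok]
    split_ifs with h1 h2 h3
    · rw [ih]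
      simp only [Prod.mk.injEq, List.count_cons]
      refine ⟨?_, ?_, ?_⟩ <;> · push_cast; simp [h1]; try ring
    · rw [ih]
      simp only [Prod.mk.injEq, List.count_cons]
      refine ⟨?_, ?_, ?_⟩ <;> push_cast <;>
        rcases h2 with h2 | h2 <;> simp_all <;> ring
    · rw [ih]
      simp only [Prod.mk.injEq, List.count_cons]
      refine ⟨?_, ?_, ?_⟩ <;> push_cast <;>
        rcases h3 with h3 | h3 | h3 <;> simp_all <;> ring
    · rw [ih]
      simp only [Prod.mk.injEq, List.count_cons]
      push Not at h2 h3
      refine ⟨?_, ?_, ?_⟩ <;> push_cast <;> simp_all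

-- ===== VERDICT =====
theorem calculate_gate_metrics_from_sequence_spec : Claim_equal_calculate_gate_metrics_from_sequence := by
  intro seq _ _
  unfold Spec_calculate_gate_metrics_from_sequence
  unfold calculate_gate_metrics_from_sequence calculate_gate_metrics_from_sequence_alt
  rw [pvA_foldl_count]
  simp [PySem.List.count]
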